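-- pv_equiv track=rewrite | github.com/danielzak555/magshimim_all_hw | Network/Semester B/homework_8/test2.py | shift_even_indices_back
-- ===== SOURCE A (Python) =====
-- def shift_even_indices_back(text: str, shift: int) -> str:
--     result = ""
--     for i, char in enumerate(text):
--         if i % 2 == 0 and char.isalpha():
--             shifted = chr(
--                 ((ord(char.lower()) - ord('a') - shift) % 26) + ord('a'))
--             result += shifted.upper() if char.isupper() else shifted
--         else:
--             result += char
--     return result
-- ===== SOURCE B (Python) =====
-- def shift_even_indices_back(text: str, shift: int) -> str:
--     def dec(c):
--         if not c.isalpha():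
--             return c
--         s = chr((ord(c.lower()) - ord('a') - shift) % 26 + ord('a'))
--         return s.upper() if c.isupper() else s
--
--     pieces = []
--     i = 0
--     n = len(text)
--     while i < n:
--         chunk = dec(text[i])
--         if i + 1 < n:
--             chunk += text[i + 1]
--         pieces.append(chunk)
--         i += 2
--     return "".join(pieces)
-- ===== Notes on version B (the rewrite author's own statement) =====
-- stated objective: alternative
-- what changed: B consumes the text in two-character chunks (shifted even char + untouched odd char), collecting chunk strings and joining once, instead of A's per-index enumerate loop with a parity test and repeated string concatenation.
import Mathlib
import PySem

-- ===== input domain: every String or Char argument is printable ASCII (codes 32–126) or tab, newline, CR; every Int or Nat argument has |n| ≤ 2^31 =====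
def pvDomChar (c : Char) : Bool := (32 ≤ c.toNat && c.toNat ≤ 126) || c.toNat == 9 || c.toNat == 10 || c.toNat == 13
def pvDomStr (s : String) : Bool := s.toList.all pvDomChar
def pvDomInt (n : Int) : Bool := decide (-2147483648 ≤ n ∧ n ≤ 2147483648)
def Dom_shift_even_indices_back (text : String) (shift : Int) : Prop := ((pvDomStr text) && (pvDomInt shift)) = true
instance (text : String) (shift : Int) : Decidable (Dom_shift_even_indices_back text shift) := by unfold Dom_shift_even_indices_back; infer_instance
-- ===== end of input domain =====

-- B consumes the text in two-character chunks instead of A's enumerate loop with a parity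
-- test; same return value everywhere (objective: alternative decomposition).

-- ===== PORT A =====
-- A: for i, char in enumerate(text): shift even-index alphabetic chars back, append each char
-- to a growing string accumulator (accumulator kept as List Char; wrapped to String at the end).
def shift_even_indices_back (text : String) (shift : Int) : String :=
  String.ofList <|
    (PySem.List.enumerate text.toList 0).foldl
      (fun result p =>
        if PySem.Int.mod p.1 2 == 0 && PySem.Chars.isalpha p.2 then
          let shifted : Char :=
            Char.ofNat (PySem.Int.mod (((PySem.Chars.lowerChar p.2).toNat : Int) - 97 - shift) 26 + 97).toNat
          result ++ [if PySem.Chars.isupper p.2 then PySem.Chars.upperChar shifted else shifted]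
        else
          result ++ [p.2])
      []

-- ===== PORT B =====
-- B's dec helper: non-alpha chars pass through, alpha chars are shifted back.
def pvDec (shift : Int) (c : Char) : Char :=
  if !PySem.Chars.isalpha c then c
  else
    let s : Char := Char.ofNat (PySem.Int.mod (((PySem.Chars.lowerChar c).toNat : Int) - 97 - shift) 26 + 97).toNat
    if PySem.Chars.isupper c then PySem.Chars.upperChar s else s

-- B's while-loop over i (i += 2): structural recursion consuming two chars per chunk.
def pvChunks (shift : Int) : List Char → List (List Char)
  | [] => []
  | [c] => [[pvDec shift c]]
  | c :: d :: rest => [pvDec shift c, d] :: pvChunks shift rest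

def shift_even_indices_back_alt (text : String) (shift : Int) : String :=
  String.ofList (pvChunks shift text.toList).flatten

-- ===== PRECONDITION & SPEC =====
def Spec_shift_even_indices_back (text : String) (shift : Int) (out : String) : Prop := out = shift_even_indices_back_alt text shift
instance (text : String) (shift : Int) (out : String) : Decidable (Spec_shift_even_indices_back text shift out) := by unfold Spec_shift_even_indices_back; infer_instance

-- ===== CLAIM (what is proved, stated in full; the proofs are below) =====
def Claim_equal_shift_even_indices_back : Prop := ∀ (text : String) (shift : Int), Dom_shift_even_indices_back text shift → Spec_shift_even_indices_back text shift (shift_even_indices_back text shift)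

-- ===== LEMMAS AND PROOFS =====

-- the single-character piece A appends for the entry (i, c)
def pvPiece (shift : Int) (p : Int × Char) : List Char :=
  if PySem.Int.mod p.1 2 == 0 && PySem.Chars.isalpha p.2 then
    let shifted : Char :=
      Char.ofNat (PySem.Int.mod (((PySem.Chars.lowerChar p.2).toNat : Int) - 97 - shift) 26 + 97).toNat
    [if PySem.Chars.isupper p.2 then PySem.Chars.upperChar shifted else shifted]
  else
    [p.2]

theorem pvPiece_even (shift : Int) (c : Char) (k : Nat) :
    pvPiece shift ((2 * (k : Int), c)) = [pvDec shift c] := by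
  by_cases ha : PySem.Chars.isalpha c <;> simp [pvPiece, pvDec, ha]

theorem pvPiece_odd (shift : Int) (c : Char) (k : Nat) :
    pvPiece shift ((2 * (k : Int) + 1, c)) = [c] := by
  simp [pvPiece]

theorem pvMain (shift : Int) (cs : List Char) : ∀ (k : Nat),
    (PySem.List.enumerate cs (2 * (k : Int))).flatMap (pvPiece shift)
      = (pvChunks shift cs).flatten := by
  induction cs using pvChunks.induct with
  | case1 => intro k; simp [PySem.List.enumerate_nil, pvChunks]
  | case2 c =>
      intro k
      simp [PySem.List.enumerate_cons, PySem.List.enumerate_nil, pvChunks, pvPiece_even]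
  | case3 c d rest ih =>
      intro k
      have h2 : 2 * (k : Int) + 1 + 1 = 2 * ((k + 1 : Nat) : Int) := by push_cast; ring
      rw [PySem.List.enumerate_cons, PySem.List.enumerate_cons, h2]
      simp only [pvChunks, List.flatMap_cons, List.flatten_cons, pvPiece_even, pvPiece_odd,
        ih (k + 1)]
      rfl

theorem shift_even_indices_back_eq_alt (text : String) (shift : Int) :
    shift_even_indices_back text shift = shift_even_indices_back_alt text shift := by
  unfold shift_even_indices_back shift_even_indices_back_alt
  have hfun : (fun (result : List Char) (p : Int × Char) =>
      if PySem.Int.mod p.1 2 == 0 && PySem.Chars.isalpha p.2 then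
        result ++ [if PySem.Chars.isupper p.2 then
            PySem.Chars.upperChar (Char.ofNat (PySem.Int.mod (((PySem.Chars.lowerChar p.2).toNat : Int) - 97 - shift) 26 + 97).toNat)
          else Char.ofNat (PySem.Int.mod (((PySem.Chars.lowerChar p.2).toNat : Int) - 97 - shift) 26 + 97).toNat]
      else result ++ [p.2])
      = (fun acc p => acc ++ pvPiece shift p) := by
    funext acc p
    simp only [pvPiece]
    split <;> rfl
  have h0 : (0 : Int) = 2 * ((0 : Nat) : Int) := by norm_num
  simp only [hfun, PySem.List.foldl_append_eq_flatMap, List.nil_append]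
  rw [h0, pvMain shift text.toList 0]

-- ===== VERDICT (by name: the statement is the Claim_ definition above) =====
theorem shift_even_indices_back_spec : Claim_equal_shift_even_indices_back := by
  intro text shift _
  unfold Spec_shift_even_indices_back
  exact shift_even_indices_back_eq_alt text shift
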